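-- pv_equiv track=rewrite | github.com/Evisom/itmo-fict | 2_semester/task1/3.py | hideMap
-- ===== SOURCE A (Python) =====
-- cards_type = ['6', '7']
--
-- def hideMap(arr):
--     j = 0
--     mp = []
--     for i in range(len(arr)):
--         if (i+1) % len(cards_type) == 0:
--             j+=1
--         if arr[i] != 'X':
--             mp.append(str(j) + str((i+1) % len(cards_type)))
--         else:
--             mp.append('X')
--     return mp
-- ===== SOURCE B (Python) =====
-- cards_type = ['6', '7']
--
-- def hideMap(arr):
--     n = len(cards_type)
--     # stage 1: pregenerate the table of position codes by nested loops (no divmod, no counter)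
--     codes = [str(q) + str(r) for q in range(len(arr) // n + 1) for r in range(n)][1:]
--     # stage 2: overlay the mask
--     return [c if x != 'X' else 'X' for x, c in zip(arr, codes)]
-- ===== Notes on version B (the rewrite author's own statement) =====
-- stated objective: alternative
-- what changed: Instead of a single stateful pass with a running counter, B pregenerates the whole table of position codes by nested loops over quotient/remainder digits (no division, no counter), slices off the leading code, and zips it with the input, replacing codes by 'X' where the element is 'X'.
import Mathlib
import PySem

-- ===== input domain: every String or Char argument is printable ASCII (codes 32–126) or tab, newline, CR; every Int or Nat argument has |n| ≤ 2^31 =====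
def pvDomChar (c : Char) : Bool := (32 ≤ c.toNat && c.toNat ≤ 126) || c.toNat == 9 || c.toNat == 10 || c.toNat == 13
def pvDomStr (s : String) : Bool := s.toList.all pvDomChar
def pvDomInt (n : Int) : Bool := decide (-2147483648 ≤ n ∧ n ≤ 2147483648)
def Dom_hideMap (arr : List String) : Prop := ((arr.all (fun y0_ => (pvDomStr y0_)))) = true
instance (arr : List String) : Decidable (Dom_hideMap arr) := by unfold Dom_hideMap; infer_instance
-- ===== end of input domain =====

-- B pregenerates the table of position codes by nested loops, slices off the first, and zips with the input — a staged-pass alternative to A's stateful counter loop; same O(n) cost.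


-- ===== PORT A =====
-- literal port: fold over range(len(arr)) with state (j, mp); arr[i] is always in range, pyGetD is exact here
def hideMap (arr : List String) : List String :=
  ((PySem.List.pyRange 0 (arr.length : Int) 1).foldl
    (fun (st : Int × List String) i =>
      let j := if PySem.Int.mod (i + 1) 2 == 0 then st.1 + 1 else st.1
      (j, st.2 ++ [if PySem.List.pyGetD arr i "" ≠ "X"
                   then PySem.Int.toStr j ++ PySem.Int.toStr (PySem.Int.mod (i + 1) 2)
                   else "X"]))
    ((0 : Int), ([] : List String))).2

-- ===== PORT B =====
-- literal port of Source B: nested-loop comprehension building the code table, [1:] slice, zip overlay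
def hideMap_alt (arr : List String) : List String :=
  let n : Nat := 2
  let codes := ((List.range (arr.length / n + 1)).flatMap
      (fun (q : Nat) => (List.range n).map
        (fun (r : Nat) => PySem.Int.toStr (Int.ofNat q) ++ PySem.Int.toStr (Int.ofNat r)))).drop 1
  (arr.zip codes).map (fun p => if p.1 != "X" then p.2 else "X")

-- ===== PRECONDITION & SPEC =====
def Spec_hideMap (arr : List String) (out : List String) : Prop := out = hideMap_alt arr
instance (arr : List String) (out : List String) : Decidable (Spec_hideMap arr out) := by unfold Spec_hideMap; infer_instance

-- ===== CLAIM (what is proved, stated in full; the proofs are below) =====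
def Claim_equal_hideMap : Prop := ∀ (arr : List String), Dom_hideMap arr → Spec_hideMap arr (hideMap arr)

-- ===== LEMMAS AND PROOFS =====

-- the per-index code both programs produce
def pvG (arr : List String) (i : Int) : String :=
  if PySem.List.pyGetD arr i "" == "X" then "X"
  else PySem.Int.toStr (PySem.Int.floordiv (i + 1) 2) ++ PySem.Int.toStr (PySem.Int.mod (i + 1) 2)

lemma pv_mod_two (a : Nat) : PySem.Int.mod ((a : Int) + 1) 2 = (((a + 1) % 2 : Nat) : Int) := by
  have : ((a : Int) + 1) = ((a + 1 : Nat) : Int) := by push_cast; ring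
  rw [this]
  exact_mod_cast PySem.Int.mod_natCast (a + 1) 2

lemma pv_fdiv_two (a : Nat) : PySem.Int.floordiv ((a : Int) + 1) 2 = (((a + 1) / 2 : Nat) : Int) := by
  have : ((a : Int) + 1) = ((a + 1 : Nat) : Int) := by push_cast; ring
  rw [this]
  exact_mod_cast PySem.Int.floordiv_natCast (a + 1) 2

lemma pv_loop (arr : List String) :
    ∀ (n a : Nat) (acc : List String), arr.length - a = n →
    ((PySem.List.pyRange (a : Int) (arr.length : Int) 1).foldl
      (fun (st : Int × List String) i =>
        let j := if PySem.Int.mod (i + 1) 2 == 0 then st.1 + 1 else st.1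
        (j, st.2 ++ [if PySem.List.pyGetD arr i "" ≠ "X"
                     then PySem.Int.toStr j ++ PySem.Int.toStr (PySem.Int.mod (i + 1) 2)
                     else "X"]))
      (((a / 2 : Nat) : Int), acc)).2
    = acc ++ (PySem.List.pyRange (a : Int) (arr.length : Int) 1).map (pvG arr) := by
  intro n
  induction n with
  | zero =>
      intro a acc h
      have hge : (arr.length : Int) ≤ (a : Int) := by exact_mod_cast Nat.le_of_sub_eq_zero h
      rw [PySem.List.pyRange_one_eq_nil hge]
      simp
  | succ m ih =>
      intro a acc h
      have hlt : (a : Int) < (arr.length : Int) := by exact_mod_cast (by omega : a < arr.length)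
      rw [PySem.List.pyRange_one_cons hlt]
      have hcast : ((a : Int) + 1) = ((a + 1 : Nat) : Int) := by push_cast; ring
      simp only [List.foldl_cons, List.map_cons]
      have hj : (if PySem.Int.mod ((a : Int) + 1) 2 == 0 then ((a / 2 : Nat) : Int) + 1 else ((a / 2 : Nat) : Int))
          = (((a + 1) / 2 : Nat) : Int) := by
        rw [pv_mod_two]
        rcases Nat.even_or_odd (a + 1) with he | ho
        · have h2 : (a + 1) % 2 = 0 := Nat.even_iff.mp he
          simp [h2]; omega
        · have h2 : (a + 1) % 2 = 1 := Nat.odd_iff.mp ho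
          simp [h2]; omega
      have helem : (if PySem.List.pyGetD arr (a : Int) "" ≠ "X"
            then PySem.Int.toStr (((a + 1) / 2 : Nat) : Int) ++ PySem.Int.toStr (PySem.Int.mod ((a : Int) + 1) 2)
            else "X") = pvG arr (a : Int) := by
        unfold pvG
        rw [pv_fdiv_two]
        by_cases hx : PySem.List.pyGetD arr (a : Int) "" = "X"
        · simp [hx]
        · simp
      rw [hj]
      have := ih (a + 1) (acc ++ [if PySem.List.pyGetD arr (a : Int) "" ≠ "X"
            then PySem.Int.toStr (((a + 1) / 2 : Nat) : Int) ++ PySem.Int.toStr (PySem.Int.mod ((a : Int) + 1) 2)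
            else "X"]) (by omega)
      rw [← hcast] at this
      rw [this, helem, List.append_assoc, List.singleton_append]

-- the nested-loop table is the map of quotient/remainder digits over a flat range
lemma pv_codes_eq (Q : Nat) (f : Nat → Nat → String) :
    (List.range Q).flatMap (fun q => (List.range 2).map (f q))
      = (List.range (2 * Q)).map (fun k => f (k / 2) (k % 2)) := by
  induction Q with
  | zero => simp
  | succ m ih =>
      rw [show List.range (m+1) = List.range m ++ [m] from List.range_succ, List.flatMap_append, ih]
      have h2 : 2 * (m + 1) = 2 * m + 1 + 1 := by omega
      rw [h2, show List.range (2*m+1+1) = List.range (2*m+1) ++ [2*m+1] from List.range_succ,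
          show List.range (2*m+1) = List.range (2*m) ++ [2*m] from List.range_succ]
      simp [List.range_succ]
      all_goals (congr 1; omega)

lemma pv_alt_eq (arr : List String) :
    hideMap_alt arr = (PySem.List.pyRange 0 (arr.length : Int) 1).map (pvG arr) := by
  show (arr.zip (((List.range (arr.length / 2 + 1)).flatMap
      (fun (q : Nat) => (List.range 2).map
        (fun (r : Nat) => PySem.Int.toStr (Int.ofNat q) ++ PySem.Int.toStr (Int.ofNat r)))).drop 1)).map
      (fun p => if p.1 != "X" then p.2 else "X")
    = (PySem.List.pyRange 0 (arr.length : Int) 1).map (pvG arr)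
  rw [pv_codes_eq]
  apply List.ext_getElem
  · simp [PySem.List.length_pyRange_one]
    omega
  · intro k h1 h2
    have hk : k < arr.length := by
      simpa [PySem.List.length_pyRange_one] using h2
    have hk1 : 1 + k < 2 * (arr.length / 2 + 1) := by omega
    simp only [List.getElem_map, List.getElem_zip, List.getElem_drop,
      PySem.List.getElem_pyRange_one, List.getElem_range, zero_add]
    unfold pvG
    rw [PySem.List.pyGetD_eq_getElem arr "" (by exact_mod_cast Nat.zero_le k)
        (by exact_mod_cast hk)]
    rw [pv_fdiv_two, pv_mod_two]
    simp only [Int.toNat_natCast]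
    by_cases hx : arr[k] = "X"
    · simp [hx]
    · have e1 : (1 + k) / 2 = (k + 1) / 2 := by omega
      have e2 : (1 + k) % 2 = (k + 1) % 2 := by omega
      simp [hx, e1, e2]

-- ===== VERDICT (by name: the statement is the Claim_ definition above) =====
theorem hideMap_spec : Claim_equal_hideMap := by
  intro arr _
  unfold Spec_hideMap hideMap
  rw [pv_alt_eq]
  have h := pv_loop arr arr.length 0 [] (by omega)
  simpa using h
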